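-- pv_equiv track=rewrite | github.com/aves-omni/aiostremio | utils/service_manager.py | _process_streams
-- ===== SOURCE A (Python) =====
-- from typing import Dict, List
--
-- def _process_streams(service_streams_list: List[List[Dict]]) -> List[Dict]:
--     """Process and organize streams from all services."""
--     all_streams = []
--     error_streams = []
--     service_streams_map = {}
--
--     for service_streams in service_streams_list:
--         for stream in service_streams:
--             if stream.get("name") == "Error":
--                 error_streams.append(stream)
--             else:
--                 service_name = stream.get("service")
--                 if service_name not in service_streams_map:
--                     service_streams_map[service_name] = []
--                 service_streams_map[service_name].append(stream)
--
--     final_streams = error_streams.copy()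
--
--     if "WatchHub" in service_streams_map:
--         all_streams.extend(service_streams_map.pop("WatchHub"))
--
--     while any(service_streams_map.values()):
--         for service_name in list(service_streams_map.keys()):
--             if service_streams_map[service_name]:
--                 all_streams.append(service_streams_map[service_name].pop(0))
--             if not service_streams_map[service_name]:
--                 del service_streams_map[service_name]
--
--     final_streams.extend(all_streams)
--     return final_streams
-- ===== SOURCE B (Python) =====
-- from typing import Dict, List
--
-- def _process_streams(service_streams_list: List[List[Dict]]) -> List[Dict]:
--     """Process and organize streams from all services."""
--     error_streams = []
--     groups = {}
--     for service_streams in service_streams_list: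
--         for stream in service_streams:
--             if stream.get("name") == "Error":
--                 error_streams.append(stream)
--             else:
--                 groups.setdefault(stream.get("service"), []).append(stream)
--     watchhub = groups.pop("WatchHub", [])
--     gs = list(groups.values())
--     interleaved = []
--     for i in range(max(map(len, gs), default=0)):
--         for g in gs:
--             if i < len(g):
--                 interleaved.append(g[i])
--     return error_streams + watchhub + interleaved
-- ===== Notes on version B (the rewrite author's own statement) =====
-- stated objective: alternative
-- what changed: The repeated while-any round-robin sweeps over the dict (with list.pop(0) shifts and deletion of exhausted keys) are replaced by a single index-transposition pass over the grouped lists (for i in range(maxlen): take group[i] from each group that is long enough), plus setdefault grouping and pop-with-default for WatchHub.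
import Mathlib
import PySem

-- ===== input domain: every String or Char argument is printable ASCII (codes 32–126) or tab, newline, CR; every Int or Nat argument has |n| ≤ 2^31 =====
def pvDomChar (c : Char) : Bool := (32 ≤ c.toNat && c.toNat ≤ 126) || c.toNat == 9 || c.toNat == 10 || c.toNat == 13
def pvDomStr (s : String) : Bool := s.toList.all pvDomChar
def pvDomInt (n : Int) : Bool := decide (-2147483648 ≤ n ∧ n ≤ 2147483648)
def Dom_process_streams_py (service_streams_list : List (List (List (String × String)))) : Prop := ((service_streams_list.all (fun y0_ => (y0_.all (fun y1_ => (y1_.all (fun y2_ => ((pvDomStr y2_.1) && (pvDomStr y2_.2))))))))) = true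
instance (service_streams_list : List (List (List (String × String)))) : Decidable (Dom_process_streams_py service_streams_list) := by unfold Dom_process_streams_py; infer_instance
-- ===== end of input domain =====

-- B replaces A's repeated whole-dict round-robin sweeps (with list.pop(0) shifts and key deletion)
-- by a single transposition pass over the grouped lists; return values proved equal (no inputs are mutated).

-- ===== PORT A =====
-- stream.get(key) on a stream dict (association list)
def pvGet (s : List (String × String)) (k : String) : Option String :=
  (PySem.Dict.mk s).get? k

-- A's first loop: split off "Error" streams, group the rest by stream.get("service")
-- ('if service_name not in map: map[service_name] = []' then 'map[service_name].append(stream)')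
def pvSplit_A (service_streams_list : List (List (List (String × String)))) :
    List (List (String × String)) × PySem.Dict (Option String) (List (List (String × String))) :=
  service_streams_list.foldl (fun st service_streams =>
    service_streams.foldl (fun st stream =>
      if pvGet stream "name" = some "Error" then (st.1 ++ [stream], st.2)
      else
        let k := pvGet stream "service"
        let m := if st.2.contains k then st.2 else st.2.insert k []
        (st.1, m.modify k [] (fun v => v ++ [stream]))) st) ([], PySem.Dict.empty)

-- one iteration of A's inner 'for service_name in list(keys)':
-- 'if m[k]: all.append(m[k].pop(0))' then 'if not m[k]: del m[k]'
-- (the key is always present when read, so m[k] is rendered with getD)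
def pvStep_A
    (st : List (List (String × String)) × PySem.Dict (Option String) (List (List (String × String))))
    (k : Option String) :
    List (List (String × String)) × PySem.Dict (Option String) (List (List (String × String))) :=
  let st1 := match st.2.getD k [] with
    | [] => st
    | s :: rest => (st.1 ++ [s], st.2.insert k rest)
  if st1.2.getD k [] = [] then (st1.1, st1.2.erase k) else st1

def pvRound_A (ks : List (Option String))
    (st : List (List (String × String)) × PySem.Dict (Option String) (List (List (String × String)))) :
    List (List (String × String)) × PySem.Dict (Option String) (List (List (String × String))) :=
  ks.foldl pvStep_A st

-- A's 'while any(map.values())' loop; each true iteration removes at least one stream,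
-- so fuel = total number of grouped streams suffices (proved in the lemmas below)
def pvWhile_A :
    Nat → List (List (String × String)) × PySem.Dict (Option String) (List (List (String × String))) →
    List (List (String × String))
  | 0, st => st.1
  | n+1, st =>
      if st.2.values.any (fun v => !v.isEmpty) then pvWhile_A n (pvRound_A st.2.keys st) else st.1

def process_streams_py (service_streams_list : List (List (List (String × String)))) :
    List (List (String × String)) :=
  let p := pvSplit_A service_streams_list
  let error_streams := p.1
  let m := p.2
  -- 'if "WatchHub" in map: all_streams.extend(map.pop("WatchHub"))'
  let q := if m.contains (some "WatchHub")
    then (m.getD (some "WatchHub") [], m.erase (some "WatchHub"))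
    else ([], m)
  error_streams ++ pvWhile_A ((q.2.values.map List.length).sum) q

-- ===== PORT B =====
-- B's first loop: 'groups.setdefault(stream.get("service"), []).append(stream)'
def pvSplit_B (service_streams_list : List (List (List (String × String)))) :
    List (List (String × String)) × PySem.Dict (Option String) (List (List (String × String))) :=
  service_streams_list.foldl (fun st service_streams =>
    service_streams.foldl (fun st stream =>
      if pvGet stream "name" = some "Error" then (st.1 ++ [stream], st.2)
      else (st.1, st.2.modify (pvGet stream "service") [] (fun v => v ++ [stream]))) st)
    ([], PySem.Dict.empty)

-- max(map(len, gs), default=0)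
def pvMaxLen (gs : List (List (List (String × String)))) : Nat :=
  gs.foldl (fun a g => max a g.length) 0

-- 'for i in range(maxlen): for g in gs: if i < len(g): out.append(g[i])'
def pvInterleave (gs : List (List (List (String × String)))) : List (List (String × String)) :=
  (List.range (pvMaxLen gs)).flatMap (fun i => gs.filterMap (fun g => g[i]?))

def process_streams_py_alt (service_streams_list : List (List (List (String × String)))) :
    List (List (String × String)) :=
  let p := pvSplit_B service_streams_list
  -- 'watchhub = groups.pop("WatchHub", [])'
  let q := match p.2.pop? (some "WatchHub") with
    | some (v, g) => (v, g)
    | none => ([], p.2)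
  p.1 ++ q.1 ++ pvInterleave q.2.values

-- ===== PRECONDITION & SPEC =====
def Spec_process_streams_py (service_streams_list : List (List (List (String × String)))) (out : List (List (String × String))) : Prop := out = process_streams_py_alt service_streams_list
instance (service_streams_list : List (List (List (String × String)))) (out : List (List (String × String))) : Decidable (Spec_process_streams_py service_streams_list out) := by unfold Spec_process_streams_py; infer_instance

-- ===== CLAIM (what is proved, stated in full; the proofs are below) =====
def Claim_equal_process_streams_py : Prop := ∀ (service_streams_list : List (List (List (String × String)))), Dom_process_streams_py service_streams_list → Spec_process_streams_py service_streams_list (process_streams_py service_streams_list)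

-- ===== LEMMAS AND PROOFS =====

theorem pvFoldlInv {α σ : Type} (Q : σ → Prop) (f : σ → α → σ)
    (h : ∀ s a, Q s → Q (f s a)) : ∀ (l : List α) (s : σ), Q s → Q (l.foldl f s)
  | [], _, hs => hs
  | a :: l, s, hs => pvFoldlInv Q f h l (f s a) (h s a hs)

theorem pvModifyDefault (d : PySem.Dict (Option String) (List (List (String × String))))
    (k : Option String) (f : List (List (String × String)) → List (List (String × String))) :
    (if d.contains k then d else d.insert k []).modify k [] f = d.modify k [] f := by
  by_cases h : d.contains k
  · simp [h]
  · simp only [h, if_neg, Bool.false_eq_true, not_false_iff]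
    have hc : d.contains k = false := by simpa using h
    simp only [PySem.Dict.modify, PySem.Dict.getD_insert_self, PySem.Dict.insert_insert_self,
      PySem.Dict.getD_of_not_contains d [] hc]

theorem pvSplit_eq (l : List (List (List (String × String)))) : pvSplit_A l = pvSplit_B l := by
  unfold pvSplit_A pvSplit_B
  congr 1
  funext st ss
  congr 1
  funext st s
  by_cases h : pvGet s "name" = some "Error"
  · simp [h]
  · simp only [h, if_neg, not_false_iff]
    rw [pvModifyDefault]

theorem pvMapIfId (k : Option String) (w : List (List (String × String)))
    (l : List ((Option String) × List (List (String × String)))) (hl : k ∉ l.map Prod.fst) :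
    l.map (fun p => if (p.1 == k) = true then (k, w) else p) = l := by
  induction l with
  | nil => rfl
  | cons p t ih =>
    simp only [List.map_cons, List.mem_cons] at hl
    have h1 : ¬ p.1 = k := fun e => hl (by simp [e])
    simp only [List.map_cons]
    rw [if_neg (by simp [h1]), ih (fun e => hl (Or.inr e))]

theorem pvFilterNeId (k : Option String)
    (l : List ((Option String) × List (List (String × String)))) (hl : k ∉ l.map Prod.fst) :
    l.filter (fun p => !(p.1 == k)) = l := by
  induction l with
  | nil => rfl
  | cons p t ih =>
    simp only [List.map_cons, List.mem_cons] at hl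
    have h1 : ¬ p.1 = k := fun e => hl (by simp [e])
    simp [h1, ih (fun e => hl (Or.inr e))]

theorem pvInsertMid (pre rest : List ((Option String) × List (List (String × String))))
    (k : Option String) (v w : List (List (String × String)))
    (hp : k ∉ pre.map Prod.fst) (hr : k ∉ rest.map Prod.fst) :
    (PySem.Dict.mk (pre ++ (k, v) :: rest)).insert k w = PySem.Dict.mk (pre ++ (k, w) :: rest) := by
  apply PySem.Dict.ext
  rw [PySem.Dict.items_insert_of_contains _ _ (by simp [PySem.Dict.contains_mk])]
  simp only [List.map_append, List.map_cons, BEq.rfl, if_pos]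
  rw [pvMapIfId k w pre hp, pvMapIfId k w rest hr]

theorem pvEraseMid (pre rest : List ((Option String) × List (List (String × String))))
    (k : Option String) (w : List (List (String × String)))
    (hp : k ∉ pre.map Prod.fst) (hr : k ∉ rest.map Prod.fst) :
    (PySem.Dict.mk (pre ++ (k, w) :: rest)).erase k = PySem.Dict.mk (pre ++ rest) := by
  apply PySem.Dict.ext
  show List.filter _ _ = _
  simp only [List.filter_append, List.filter_cons, BEq.rfl, Bool.not_true, Bool.false_eq_true,
    if_false]
  rw [pvFilterNeId k pre hp, pvFilterNeId k rest hr]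

theorem pvGetD_mk (pre post : List ((Option String) × List (List (String × String))))
    (k : Option String) (v : List (List (String × String)))
    (hnd : ((pre ++ (k, v) :: post).map Prod.fst).Nodup) :
    (PySem.Dict.mk (pre ++ (k, v) :: post)).getD k [] = v :=
  PySem.Dict.getD_of_mem_items _ (by simp) (by simpa [PySem.Dict.keys_mk] using hnd) []

theorem pvRound_A_cons (k : Option String) (ks : List (Option String))
    (st : List (List (String × String)) × PySem.Dict (Option String) (List (List (String × String)))) :
    pvRound_A (k :: ks) st = pvRound_A ks (pvStep_A st k) := rfl

theorem pvRound_go : ∀ (post pre : List ((Option String) × List (List (String × String))))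
    (acc : List (List (String × String))),
    ((pre ++ post).map Prod.fst).Nodup → (∀ p ∈ post, p.2 ≠ []) →
    pvRound_A (post.map Prod.fst) (acc, PySem.Dict.mk (pre ++ post))
      = (acc ++ post.map (fun p => p.2.headD []),
         PySem.Dict.mk (pre ++ (post.map (fun p => (p.1, p.2.tail))).filter (fun p => !p.2.isEmpty))) := by
  intro post
  induction post with
  | nil => intro pre acc _ _; simp [pvRound_A]
  | cons p rest ih =>
    intro pre acc hnd hne
    obtain ⟨k, v⟩ := p
    obtain ⟨s, vt, rfl⟩ : ∃ s vt, v = s :: vt := by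
      rcases v with _ | ⟨s, vt⟩
      · exact absurd rfl (hne (k, []) (by simp))
      · exact ⟨s, vt, rfl⟩
    have hnd' : (k :: (pre.map Prod.fst ++ rest.map Prod.fst)).Nodup := by
      have h0 := hnd
      rw [List.map_append, List.map_cons] at h0
      exact List.nodup_middle.mp h0
    have hk : k ∉ pre.map Prod.fst ++ rest.map Prod.fst := (List.nodup_cons.mp hnd').1
    have hp : k ∉ pre.map Prod.fst := fun h => hk (List.mem_append.mpr (Or.inl h))
    have hr : k ∉ rest.map Prod.fst := fun h => hk (List.mem_append.mpr (Or.inr h))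
    have hgd : (PySem.Dict.mk (pre ++ (k, s :: vt) :: rest)).getD k [] = s :: vt :=
      pvGetD_mk pre rest k (s :: vt) hnd
    rw [List.map_cons, pvRound_A_cons]
    have hstep : pvStep_A (acc, PySem.Dict.mk (pre ++ (k, s :: vt) :: rest)) k
        = if vt = [] then (acc ++ [s], PySem.Dict.mk (pre ++ rest))
          else (acc ++ [s], PySem.Dict.mk (pre ++ (k, vt) :: rest)) := by
      rw [pvStep_A]
      simp only [hgd]
      rw [pvInsertMid pre rest k (s :: vt) vt hp hr]
      by_cases hvt : vt = []
      · subst hvt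
        rw [if_pos (pvGetD_mk pre rest k [] (by simpa using hnd))]
        rw [pvEraseMid pre rest k [] hp hr]
        simp
      · rw [if_neg (by rw [pvGetD_mk pre rest k vt (by simpa using hnd)]; exact hvt), if_neg hvt]
    rw [hstep]
    have hneR : ∀ p ∈ rest, p.2 ≠ [] := fun p hp' => hne p (List.mem_cons_of_mem _ hp')
    by_cases hvt : vt = []
    · subst hvt
      rw [if_pos rfl]
      have hndR : ((pre ++ rest).map Prod.fst).Nodup := by
        rw [List.map_append]
        exact hnd'.of_cons
      rw [show pvRound_A (rest.map Prod.fst) (acc ++ [s], PySem.Dict.mk (pre ++ rest))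
            = _ from ih pre (acc ++ [s]) hndR hneR]
      simp
    · rw [if_neg hvt]
      have hassoc : pre ++ (k, vt) :: rest = (pre ++ [(k, vt)]) ++ rest := by simp
      rw [hassoc]
      rw [show pvRound_A (rest.map Prod.fst) (acc ++ [s], PySem.Dict.mk ((pre ++ [(k, vt)]) ++ rest))
            = _ from ih (pre ++ [(k, vt)]) (acc ++ [s]) (by simpa using hnd) hneR]
      simp [hvt]

theorem pvMaxLenAux_filter (gs : List (List (List (String × String)))) :
    ∀ a : Nat, (gs.filter (fun g => !g.isEmpty)).foldl (fun a g => max a g.length) a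
      = gs.foldl (fun a g => max a g.length) a := by
  induction gs with
  | nil => intro a; rfl
  | cons g t ih =>
    intro a
    rcases g with _ | ⟨x, xs⟩
    · simpa using ih a
    · simpa using ih (max a (x :: xs).length)

theorem pvMaxLen_filter (gs : List (List (List (String × String)))) :
    pvMaxLen (gs.filter (fun g => !g.isEmpty)) = pvMaxLen gs := pvMaxLenAux_filter gs 0

theorem pvMaxLenAux_tail (gs : List (List (List (String × String)))) :
    (∀ g ∈ gs, g ≠ []) → ∀ a : Nat,
    gs.foldl (fun a g => max a g.length) (a + 1)
      = (gs.map List.tail).foldl (fun a g => max a g.length) a + 1 := by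
  induction gs with
  | nil => intro _ a; rfl
  | cons g t ih =>
    intro hall a
    rcases g with _ | ⟨x, xs⟩
    · exact absurd rfl (hall [] (by simp))
    · have : max (a + 1) (x :: xs).length = max a xs.length + 1 := by
        simp only [List.length_cons]; omega
      simp only [List.foldl_cons, List.map_cons, this, List.tail_cons]
      exact ih (fun g hg => hall g (List.mem_cons_of_mem _ hg)) (max a xs.length)

theorem pvMaxLen_tail (gs : List (List (List (String × String)))) (hne : gs ≠ [])
    (hall : ∀ g ∈ gs, g ≠ []) : pvMaxLen gs = pvMaxLen (gs.map List.tail) + 1 := by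
  rcases gs with _ | ⟨g, t⟩
  · exact absurd rfl hne
  rcases g with _ | ⟨x, xs⟩
  · exact absurd rfl (hall [] (by simp))
  have h1 : ∀ g ∈ t, g ≠ [] := fun g hg => hall g (List.mem_cons_of_mem _ hg)
  simp only [pvMaxLen, List.map_cons, List.foldl_cons, List.tail_cons, List.length_cons,
    Nat.zero_max]
  exact pvMaxLenAux_tail t h1 xs.length

theorem pvRow_zero (gs : List (List (List (String × String)))) (hall : ∀ g ∈ gs, g ≠ []) :
    gs.filterMap (fun g => g[0]?) = gs.map (fun g => g.headD []) := by
  induction gs with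
  | nil => rfl
  | cons g t ih =>
    rcases g with _ | ⟨x, xs⟩
    · exact absurd rfl (hall [] (by simp))
    · simp [ih (fun g hg => hall g (List.mem_cons_of_mem _ hg))]

theorem pvRow_succ (gs : List (List (List (String × String)))) (i : Nat) :
    gs.filterMap (fun g => g[i + 1]?) = (gs.map List.tail).filterMap (fun g => g[i]?) := by
  induction gs with
  | nil => rfl
  | cons g t ih =>
    rcases g with _ | ⟨x, xs⟩
    · simp [ih]
    · simp only [List.filterMap_cons, List.map_cons, List.tail_cons, List.getElem?_cons_succ, ih]

theorem pvRow_filter (gs : List (List (List (String × String)))) (i : Nat) :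
    (gs.filter (fun g => !g.isEmpty)).filterMap (fun g => g[i]?)
      = gs.filterMap (fun g => g[i]?) := by
  induction gs with
  | nil => rfl
  | cons g t ih =>
    rcases g with _ | ⟨x, xs⟩ <;> simp [List.filterMap_cons, ih]

theorem pvInterleave_peel (gs : List (List (List (String × String)))) (hne : gs ≠ [])
    (hall : ∀ g ∈ gs, g ≠ []) :
    pvInterleave gs = gs.map (fun g => g.headD [])
      ++ pvInterleave ((gs.map List.tail).filter (fun g => !g.isEmpty)) := by
  unfold pvInterleave
  rw [pvMaxLen_filter, pvMaxLen_tail gs hne hall, List.range_succ_eq_map, List.flatMap_cons,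
    List.flatMap_map]
  congr 1
  · exact pvRow_zero gs hall
  · refine List.flatMap_congr (fun i _ => ?_)
    show List.filterMap (fun g => g[i + 1]?) gs = _
    rw [pvRow_succ, ← pvRow_filter]

def pvInv (m : PySem.Dict (Option String) (List (List (String × String)))) : Prop :=
  m.keys.Nodup ∧ ∀ v ∈ m.values, v ≠ []

theorem pvInv_empty : pvInv (PySem.Dict.empty) := by
  constructor
  · simp [PySem.Dict.keys, PySem.Dict.empty]
  · simp [PySem.Dict.values, PySem.Dict.empty]

theorem pvInv_modify (m : PySem.Dict (Option String) (List (List (String × String))))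
    (k : Option String) (s : List (String × String)) (h : pvInv m) :
    pvInv (m.modify k [] (fun v => v ++ [s])) := by
  rw [PySem.Dict.modify]
  constructor
  · exact PySem.Dict.nodup_keys_insert _ _ _ h.1
  · intro v hv
    rcases PySem.Dict.mem_values_insert _ _ _ _ hv with h1 | h1
    · subst h1; simp
    · exact h.2 v h1

theorem pvInv_erase (m : PySem.Dict (Option String) (List (List (String × String))))
    (k : Option String) (h : pvInv m) : pvInv (m.erase k) := by
  constructor
  · exact List.Nodup.sublist (List.Sublist.map _ (List.filter_sublist)) h.1
  · intro v hv
    have : v ∈ m.values := (List.Sublist.map _ (List.filter_sublist (l := m.items))).mem hv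
    exact h.2 v this

theorem pvInv_splitB (l : List (List (List (String × String)))) : pvInv (pvSplit_B l).2 := by
  unfold pvSplit_B
  have inner : ∀ (ss : List (List (String × String)))
      (st : List (List (String × String)) × PySem.Dict (Option String) (List (List (String × String)))),
      pvInv st.2 → pvInv (ss.foldl (fun st stream =>
        if pvGet stream "name" = some "Error" then (st.1 ++ [stream], st.2)
        else (st.1, st.2.modify (pvGet stream "service") [] (fun v => v ++ [stream]))) st).2 := by
    intro ss
    refine pvFoldlInv (σ := List (List (String × String)) × PySem.Dict (Option String) (List (List (String × String)))) (fun st => pvInv st.2) _ (fun st a h => ?_) ss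
    by_cases hc : pvGet a "name" = some "Error"
    · simpa [hc] using h
    · simpa [hc] using pvInv_modify st.2 (pvGet a "service") a h
  exact pvFoldlInv (σ := List (List (String × String)) × PySem.Dict (Option String) (List (List (String × String)))) (fun st => pvInv st.2) _ (fun st a h => inner a st h) l ([], PySem.Dict.empty) pvInv_empty

theorem pvSum_tails_le (vs : List (List (List (String × String)))) :
    ((((vs.map List.tail).filter (fun g => !g.isEmpty)).map List.length).sum)
      ≤ ((vs.map List.length).sum) := by
  induction vs with
  | nil => simp
  | cons v t ih =>
    simp only [List.map_cons, List.filter_cons]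
    by_cases h : v.tail.isEmpty
    · simp only [h, Bool.not_true, Bool.false_eq_true, if_false, List.sum_cons]
      have h2 : v.tail.length = v.length - 1 := List.length_tail
      omega
    · simp only [h, Bool.not_false, if_pos, List.map_cons, List.sum_cons]
      have h2 : v.tail.length ≤ v.length := by
        rw [List.length_tail]; omega
      omega

theorem pvSum_tails_lt (vs : List (List (List (String × String)))) (hne : vs ≠ [])
    (hall : ∀ v ∈ vs, v ≠ []) :
    ((((vs.map List.tail).filter (fun g => !g.isEmpty)).map List.length).sum)
      < ((vs.map List.length).sum) := by
  rcases vs with _ | ⟨v, t⟩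
  · exact absurd rfl hne
  rcases v with _ | ⟨x, xs⟩
  · exact absurd rfl (hall [] (by simp))
  have ht := pvSum_tails_le t
  simp only [List.map_cons, List.tail_cons, List.filter_cons]
  by_cases h : xs.isEmpty
  · simp only [h, Bool.not_true, Bool.false_eq_true, if_false, List.length_cons, List.sum_cons]
    omega
  · simp only [h, Bool.not_false, if_pos, List.map_cons, List.sum_cons, List.length_cons]
    omega

theorem pvInterleave_nil : pvInterleave [] = [] := rfl

theorem pvWhile_eq : ∀ (n : Nat)
    (m : PySem.Dict (Option String) (List (List (String × String))))
    (acc : List (List (String × String))),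
    ((m.values.map List.length).sum ≤ n) → pvInv m →
    pvWhile_A n (acc, m) = acc ++ pvInterleave m.values := by
  intro n
  induction n with
  | zero =>
    intro m acc hsum hinv
    have hval : m.values = [] := by
      rcases hv : m.values with _ | ⟨v, t⟩
      · rfl
      · exfalso
        have h1 : v ≠ [] := hinv.2 v (by rw [hv]; simp)
        have : 1 ≤ v.length := by
          rcases v with _ | _
          · exact absurd rfl h1
          · simp
        rw [hv] at hsum
        simp only [List.map_cons, List.sum_cons] at hsum
        omega
    rw [hval]
    simp [pvWhile_A, pvInterleave_nil]
  | succ n ih =>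
    intro m acc hsum hinv
    obtain ⟨items⟩ := m
    rcases hit : items with _ | ⟨p, ps⟩
    · subst hit
      simp [pvWhile_A, PySem.Dict.values, pvInterleave_nil]
    · subst hit
      have hvals : (PySem.Dict.mk (p :: ps)).values = (p :: ps).map Prod.snd := rfl
      have hanytrue : ((PySem.Dict.mk (p :: ps)).values.any (fun v => !v.isEmpty)) = true := by
        rw [hvals]
        have hp2 : p.2 ≠ [] := hinv.2 p.2 (by rw [hvals]; simp)
        simp only [List.map_cons, List.any_cons, Bool.or_eq_true]
        left
        simpa [List.isEmpty_iff] using hp2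
      rw [pvWhile_A, if_pos hanytrue]
      have hkeys : (PySem.Dict.mk (p :: ps)).keys = (p :: ps).map Prod.fst := rfl
      have hnd : (((@List.nil ((Option String) × List (List (String × String)))) ++ (p :: ps)).map Prod.fst).Nodup := by
        simpa using hinv.1
      have hne : ∀ q ∈ (p :: ps), q.2 ≠ [] := by
        intro q hq
        exact hinv.2 q.2 (by rw [hvals]; exact List.mem_map_of_mem hq)
      have hround := pvRound_go (p :: ps) [] acc hnd hne
      simp only [List.nil_append] at hround
      rw [hkeys, hround]
      -- the new dict
      set newitems := ((p :: ps).map (fun q => (q.1, q.2.tail))).filter (fun q => !q.2.isEmpty) with hni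
      have hnv : (PySem.Dict.mk newitems).values
          = (((p :: ps).map Prod.snd).map List.tail).filter (fun g => !g.isEmpty) := by
        show newitems.map Prod.snd = _
        simp only [hni, List.filter_map, List.map_map, Function.comp_def]
      have hvne : (p :: ps).map Prod.snd ≠ [] := by simp
      have hlt := pvSum_tails_lt ((p :: ps).map Prod.snd) hvne
        (fun v hv => hinv.2 v (by rw [hvals]; exact hv))
      have hsum' : (((PySem.Dict.mk newitems).values.map List.length).sum) ≤ n := by
        rw [hnv]
        rw [hvals] at hsum
        omega
      have hinv' : pvInv (PySem.Dict.mk newitems) := by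
        constructor
        · show (newitems.map Prod.fst).Nodup
          have hsub : newitems.Sublist ((p :: ps).map (fun q => (q.1, q.2.tail))) := by
            rw [hni]; exact List.filter_sublist
          refine List.Nodup.sublist (hsub.map Prod.fst) ?_
          have heq : (((p :: ps).map (fun q => (q.1, q.2.tail))).map Prod.fst)
              = (p :: ps).map Prod.fst := by
            rw [List.map_map]; rfl
          rw [heq]
          simpa using hinv.1
        · intro v hv
          rw [hnv] at hv
          have := List.of_mem_filter hv
          simpa [List.isEmpty_iff] using this
      rw [ih (PySem.Dict.mk newitems) (acc ++ (p :: ps).map (fun q => q.2.headD [])) hsum' hinv']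
      rw [hnv]
      have hpeel := pvInterleave_peel ((p :: ps).map Prod.snd) hvne
        (fun v hv => hinv.2 v (by rw [hvals]; exact hv))
      rw [hvals, hpeel]
      have hheads : (p :: ps).map (fun q => q.2.headD [])
          = ((p :: ps).map Prod.snd).map (fun g => g.headD []) := by
        rw [List.map_map]; rfl
      rw [hheads, List.append_assoc]

theorem pvMain (l : List (List (List (String × String)))) :
    process_streams_py l = process_streams_py_alt l := by
  unfold process_streams_py process_streams_py_alt
  rw [pvSplit_eq]
  have hinv := pvInv_splitB l
  by_cases hc : (pvSplit_B l).2.contains (some "WatchHub")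
  · obtain ⟨v, hv⟩ : ∃ v, (pvSplit_B l).2.get? (some "WatchHub") = some v := by
      rw [PySem.Dict.contains_eq_isSome_get?] at hc
      exact Option.isSome_iff_exists.mp hc
    simp only [hc, if_pos, PySem.Dict.pop?, hv, Option.map_some,
      PySem.Dict.getD_of_get?_eq_some _ _ hv]
    rw [pvWhile_eq _ _ _ le_rfl (pvInv_erase _ _ hinv), List.append_assoc]
  · have hv : (pvSplit_B l).2.get? (some "WatchHub") = none := by
      rw [PySem.Dict.contains_eq_isSome_get?] at hc
      simpa using hc
    simp only [hc, Bool.false_eq_true, if_false, PySem.Dict.pop?, hv, Option.map_none]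
    rw [pvWhile_eq _ _ _ le_rfl hinv]
    simp

-- ===== VERDICT (by name: the statement is the Claim_ definition above) =====
theorem process_streams_py_spec : Claim_equal_process_streams_py := by
  intro service_streams_list _
  exact pvMain service_streams_list
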